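-- pv_equiv track=rewrite | github.com/Usmanova555/Completed-tasks | python & django/c_10_01/t08_10_01.py | mod_powers
-- ===== SOURCE A (Python) =====
-- def mod_powers(a, n):
--     i = 0
--     while(True):
--         if((a**i) % n == 1 and i != 0):
--             yield 1
--             break
--         yield (a**i) % n
--         i += 1
-- ===== SOURCE B (Python) =====
-- def mod_powers(a, n):
--     yield 1 % n
--     x = a % n
--     while x != 1:
--         yield x
--         x = (x * a) % n
--     yield 1
-- ===== Notes on version B (the rewrite author's own statement) =====
-- stated objective: alternative
-- what changed: B keeps a running modular product x = (x*a) % n updated with one small multiplication per term instead of recomputing the big-integer power a**i and reducing it mod n at every iteration.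
import Mathlib
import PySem

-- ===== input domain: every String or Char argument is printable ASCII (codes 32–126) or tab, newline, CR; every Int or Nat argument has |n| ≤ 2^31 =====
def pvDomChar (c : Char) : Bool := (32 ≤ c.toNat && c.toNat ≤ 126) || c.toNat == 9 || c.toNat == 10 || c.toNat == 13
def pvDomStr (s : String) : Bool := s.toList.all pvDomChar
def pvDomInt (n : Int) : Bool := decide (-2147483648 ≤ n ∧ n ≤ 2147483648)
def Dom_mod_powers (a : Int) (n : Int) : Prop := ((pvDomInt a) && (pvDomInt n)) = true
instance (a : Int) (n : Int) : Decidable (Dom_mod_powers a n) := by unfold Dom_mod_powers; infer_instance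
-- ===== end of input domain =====

-- B maintains the running modular product instead of recomputing a**i each iteration (one small
-- multiplication per term instead of a full re-exponentiation): same yielded sequence, less work per term.

-- ===== PORT A =====
-- A's while-loop: at step i, test (a**i) % n == 1 and i != 0; on success yield 1 and stop,
-- otherwise yield (a**i) % n and continue. Fuel n.toNat + 1 suffices on Pre_ (Euler: the
-- multiplicative order of a mod n is at most φ(n) ≤ n), proved below; outside Pre_ the Python loops forever.
def modpowLoopA (a n : Int) : Nat → Nat → List Int
  | 0, _ => []
  | f + 1, i =>
      if PySem.Int.mod (a ^ i) n = 1 ∧ i ≠ 0 then [1]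
      else PySem.Int.mod (a ^ i) n :: modpowLoopA a n f (i + 1)

def mod_powers (a : Int) (n : Int) : List Int := modpowLoopA a n (n.toNat + 1) 0

-- ===== PORT B =====
-- B's while-loop: x starts at a % n and is multiplied by a (mod n) each step until x = 1.
def modpowLoopB (a n : Int) : Nat → Int → List Int
  | 0, _ => []
  | f + 1, x =>
      if x = 1 then [] else x :: modpowLoopB a n f (PySem.Int.mod (x * a) n)

def mod_powers_alt (a : Int) (n : Int) : List Int :=
  PySem.Int.mod 1 n :: (modpowLoopB a n n.toNat (PySem.Int.mod a n) ++ [1])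

-- ===== PRECONDITION & SPEC =====
-- A terminates exactly when some positive power of a is ≡ 1 (mod n), i.e. n ≥ 2 and gcd(a,n) = 1:
-- for n = 0 Python raises ZeroDivisionError, and for n = 1, n < 0 or gcd(a,n) ≠ 1 the generator
-- never stops (no value is returned); Pre_ excludes exactly those inputs.
def Pre_mod_powers (a : Int) (n : Int) : Prop := 2 ≤ n ∧ Int.gcd a n = 1
instance (a : Int) (n : Int) : Decidable (Pre_mod_powers a n) := by unfold Pre_mod_powers; infer_instance
def pvWitness_mod_powers : Int × Int := (3, 7)

def Spec_mod_powers (a : Int) (n : Int) (out : List Int) : Prop := out = mod_powers_alt a n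
instance (a : Int) (n : Int) (out : List Int) : Decidable (Spec_mod_powers a n out) := by unfold Spec_mod_powers; infer_instance

-- ===== CLAIM (what is proved, stated in full; the proofs are below) =====
def Claim_equal_mod_powers : Prop := ∀ (a : Int) (n : Int), Dom_mod_powers a n → Pre_mod_powers a n → Spec_mod_powers a n (mod_powers a n)

-- ===== LEMMAS AND PROOFS =====

-- Euler: a^φ(n) ≡ 1 (mod n) for coprime a, n ≥ 2, stated on PySem.Int.mod.
lemma euler_mod_one (a n : Int) (hn : 2 ≤ n) (hg : Int.gcd a n = 1) :
    PySem.Int.mod (a ^ Nat.totient n.toNat) n = 1 := by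
  have hpos : (0:Int) < n := by omega
  haveI : NeZero n.toNat := ⟨by omega⟩
  have hcop : Nat.Coprime a.natAbs n.toNat := by
    have h1 : Int.gcd a n = a.natAbs.gcd n.natAbs := rfl
    have h2 : n.natAbs = n.toNat := by omega
    rw [h1, h2] at hg; exact hg
  have hu : IsUnit ((a : ZMod n.toNat)) := by
    have h1 : IsUnit ((a.natAbs : ZMod n.toNat)) := (ZMod.isUnit_iff_coprime _ _).mpr hcop
    rcases Int.natAbs_eq a with h | h
    · rw [h, Int.cast_natCast]; exact h1
    · rw [h, Int.cast_neg, Int.cast_natCast]; exact h1.neg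
  obtain ⟨u, hu⟩ := hu
  have hup : ((a : ZMod n.toNat)) ^ Nat.totient n.toNat = 1 := by
    rw [← hu, ← Units.val_pow_eq_pow_val, ZMod.pow_totient u, Units.val_one]
  have hmodeq : (a ^ Nat.totient n.toNat : Int) ≡ (1 : Int) [ZMOD (n.toNat : Nat)] := by
    rw [← ZMod.intCast_eq_intCast_iff]
    push_cast
    exact hup
  have hcast : ((n.toNat : Int)) = n := Int.toNat_of_nonneg (by omega)
  have : (a ^ Nat.totient n.toNat) % n = 1 % n := by
    have := hmodeq
    unfold Int.ModEq at this
    rwa [hcast] at this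
  rw [PySem.Int.mod_eq_emod_of_pos hpos, this, Int.emod_eq_of_lt (by omega) (by omega)]

-- incremental-product step: ((a^i % n) * a) % n = a^(i+1) % n
lemma mul_step (a n : Int) (i : Nat) :
    ((a ^ i % n) * a) % n = a ^ (i + 1) % n := by
  rw [pow_succ, Int.mul_emod, Int.emod_emod_of_dvd _ dvd_rfl, ← Int.mul_emod]

-- the two loops agree given enough fuel to reach a power ≡ 1
lemma loop_eq (a n : Int) (hn : 2 ≤ n) :
    ∀ (f i k : Nat), 1 ≤ i → i ≤ k → k < i + f → PySem.Int.mod (a ^ k) n = 1 →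
    modpowLoopA a n f i = modpowLoopB a n f (PySem.Int.mod (a ^ i) n) ++ [1] := by
  intro f
  induction f with
  | zero => intro i k h1 h2 h3 _; omega
  | succ f ih =>
    intro i k h1 h2 h3 hk
    by_cases hx : PySem.Int.mod (a ^ i) n = 1
    · simp [modpowLoopA, modpowLoopB, hx, Nat.one_le_iff_ne_zero.mp h1]
    · have hik : i ≠ k := by rintro rfl; exact hx hk
      have hstep : PySem.Int.mod (PySem.Int.mod (a ^ i) n * a) n = PySem.Int.mod (a ^ (i + 1)) n := by
        rw [PySem.Int.mod_eq_emod_of_pos (by omega), PySem.Int.mod_eq_emod_of_pos (by omega),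
          PySem.Int.mod_eq_emod_of_pos (by omega)]
        exact mul_step a n i
      rw [show modpowLoopA a n (f+1) i = PySem.Int.mod (a ^ i) n :: modpowLoopA a n f (i+1) by
            simp [modpowLoopA, hx],
          show modpowLoopB a n (f+1) (PySem.Int.mod (a ^ i) n)
              = PySem.Int.mod (a ^ i) n :: modpowLoopB a n f (PySem.Int.mod (PySem.Int.mod (a ^ i) n * a) n) by
            simp [modpowLoopB, hx]]
      rw [hstep, ih (i + 1) k (by omega) (by omega) (by omega) hk]
      simp

-- ===== VERDICT (by name: the statement is the Claim_ definition above) =====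
theorem mod_powers_spec : Claim_equal_mod_powers := by
  intro a n _ hpre
  obtain ⟨hn, hg⟩ := hpre
  show mod_powers a n = mod_powers_alt a n
  have hk := euler_mod_one a n hn hg
  have hk1 : 1 ≤ Nat.totient n.toNat := Nat.totient_pos.mpr (by omega)
  have hk2 : Nat.totient n.toNat ≤ n.toNat := Nat.totient_le _
  unfold mod_powers mod_powers_alt
  rw [show modpowLoopA a n (n.toNat + 1) 0 =
        PySem.Int.mod (a ^ 0) n :: modpowLoopA a n n.toNat 1 by
      simp [modpowLoopA]]
  rw [loop_eq a n hn n.toNat 1 (Nat.totient n.toNat) le_rfl hk1 (by omega) hk]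
  rw [pow_zero, pow_one]
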